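-- pv_equiv track=rewrite | github.com/ECB2020/Hobyah | generics.py | FormatOnLines
-- ===== SOURCE A (Python) =====
-- def FormatOnLines(my_list, lastword = "and", width = 45, indent = 3):
--     '''Take a list of keywords and format them into a string of text
--     with lines no shorter than 45 characters long, with each word
--     separated by ", " and ending with "and <last entry>." by default
--     (some routines calling it replace "and" with "or".
--     Return the string.  Used to give lists of valid keywords in
--     error messages.
--     We also cut out any entries that are "block_index", because those
--     are valid dictionary keys in all blocks but are not the names of
--     tunnels, sectypes, fans, etc.  The moment you publish something to
--     the world and its dog, stuff in your documentation starts leaping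
--     out at you and smacking you on the head.
--
--         Parameters:
--             my_list   []    a list of keywords or numbers.
--             lastword  str   The word to use to end the list in natural
--                             language.  The default is "and" (for use in
--                             lists like "a, b and c") but can be set to
--                             "or" if that makes more sense.
--             width     int   The width of lines to use.  In error messages
--                             this is 45, when called from _error-statements.py
--                             it can be wider.
--
--
--         Returns:
--             line      str   lines of text with the keywords, properly formatted.
--     '''
--     len_list = len(my_list)
--     pad = ' ' * indent
--     true_list = list(my_list)
--     try:
--         # Most dictionaries have a key named "block_index" that points
--         # to the line that the block started at.  We don't want to include
--         # that in a list of sectype names, tunnel names, route names etc.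
--         true_list.remove("block_index")
--     except ValueError:
--         # It doesn't exist in this list.
--         pass
--     if len_list == 1:
--         line = ">" + pad + str(my_list[0]) + "."
--     else:
--         line = ">" + pad
--         for index, entry in enumerate(my_list):
--             if index == (len_list - 2):
--                 # This is the 2nd last entry, we don't append
--                 # a comma
--                 line = line + str(entry) + ' '
--             elif index == (len_list - 1):
--                 # This is the last entry, we include "and".
--                 line = line + lastword + " " + str(entry) + "."
--             else:
--                 # Just a standard entry.
--                 line = line + str(entry) + ", "
--             # Check if we have more to add and the line is
--             # long enough.  Start a new line if it is.
--             if (index != (len_list - 1) and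
--                 len(line.split(sep = "\n")[-1]) > width):
--                     line = line + "\n>   "
--     return(line)
-- ===== SOURCE B (Python) =====
-- def FormatOnLines(my_list, lastword = "and", width = 45, indent = 3):
--     """Two staged passes: first build the list of text pieces by slicing
--     (no per-element position tests), then a wrap pass over the pieces that
--     tracks the current last-line length with rfind instead of re-splitting
--     the accumulated string."""
--     pad = ' ' * indent
--     if len(my_list) == 1:
--         return ">" + pad + str(my_list[0]) + "."
--     pieces = [str(e) + ", " for e in my_list[:-2]]
--     if len(my_list) >= 2:
--         pieces.append(str(my_list[-2]) + ' ')
--         pieces.append(lastword + " " + str(my_list[-1]) + ".")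
--     parts = [">" + pad]
--     cur = 1 + len(pad)
--     last = len(pieces) - 1
--     for i, piece in enumerate(pieces):
--         parts.append(piece)
--         j = piece.rfind('\n')
--         cur = len(piece) - 1 - j if j >= 0 else cur + len(piece)
--         if i != last and cur > width:
--             parts.append("\n>   ")
--             cur = 4
--     return ''.join(parts)
-- ===== Notes on version B (the rewrite author's own statement) =====
-- stated objective: faster
-- what changed: B is two staged passes: it first builds the list of text pieces by slicing (no per-element position tests), then a wrap pass over the pieces that joins them once at the end and updates the current last-line length from the piece's own rfind('\n'), instead of A's single loop that rebuilds the string and re-splits the whole accumulated line on '\n' at every iteration.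
import Mathlib
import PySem

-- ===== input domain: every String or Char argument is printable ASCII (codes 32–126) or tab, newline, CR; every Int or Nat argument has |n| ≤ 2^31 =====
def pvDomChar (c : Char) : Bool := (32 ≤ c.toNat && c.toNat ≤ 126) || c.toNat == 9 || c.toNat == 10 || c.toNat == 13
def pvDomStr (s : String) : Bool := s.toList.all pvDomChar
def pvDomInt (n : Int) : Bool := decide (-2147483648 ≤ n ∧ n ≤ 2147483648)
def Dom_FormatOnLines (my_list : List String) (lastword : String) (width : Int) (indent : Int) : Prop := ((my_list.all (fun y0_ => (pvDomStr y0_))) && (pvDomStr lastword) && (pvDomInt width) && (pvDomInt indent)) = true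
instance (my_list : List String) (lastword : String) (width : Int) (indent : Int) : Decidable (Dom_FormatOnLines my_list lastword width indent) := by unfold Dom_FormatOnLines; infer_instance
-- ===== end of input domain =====

-- B builds the pieces by slicing in a first pass and then wraps them in a second
-- pass that joins once and gets the last-line length from the piece's rfind('\n'),
-- where A's single loop re-splits the whole accumulated string every iteration
-- (objective: faster).

-- ===== PORT A =====
-- loop body of A: append the entry's piece, then re-split the whole line on "\n"
-- and start a new line if the last one is long enough
def pvStepA (len_list width : Int) (lastword : String) (line : List Char) (p : Int × String) : List Char :=
  let line :=
    if p.1 == len_list - 2 then line ++ p.2.toList ++ [' ']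
    else if p.1 == len_list - 1 then line ++ lastword.toList ++ [' '] ++ p.2.toList ++ ['.']
    else line ++ p.2.toList ++ [',', ' ']
  if p.1 != len_list - 1 &&
      decide ((((PySem.List.pyGet? (PySem.Chars.splitOn line ['\n']) (-1)).getD []).length : Int) > width) then
    line ++ ['\n', '>', ' ', ' ', ' ']
  else line

def FormatOnLines (my_list : List String) (lastword : String) (width : Int) (indent : Int) : String :=
  let len_list : Int := (my_list.length : Int)
  let pad : List Char := List.replicate indent.toNat ' '
  -- true_list = list(my_list); try: true_list.remove("block_index") except ValueError: pass
  -- (true_list is never used afterwards)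
  let _true_list : List String :=
    match PySem.List.remove? my_list "block_index" with
    | some l => l
    | none => my_list
  if len_list == 1 then
    String.ofList ('>' :: pad ++ ((PySem.List.pyGet? my_list 0).getD "").toList ++ ['.'])
  else
    String.ofList ((PySem.List.enumerate my_list 0).foldl (pvStepA len_list width lastword) ('>' :: pad))

-- ===== PORT B =====
-- first pass of B: the text pieces, built by slicing — ", "-suffixed entries from
-- my_list[:-2], then the two closing pieces (my_list[-2]/my_list[-1] via pyGet?,
-- total with getD since len ≥ 2 there)
def pvPieces (my_list : List String) (lastword : String) : List (List Char) :=
  let ps := (PySem.List.slice my_list none (some (-2))).map (fun e => e.toList ++ [',', ' '])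
  if 2 ≤ my_list.length then
    ps ++ [((PySem.List.pyGet? my_list (-2)).getD "").toList ++ [' '],
           lastword.toList ++ [' '] ++ ((PySem.List.pyGet? my_list (-1)).getD "").toList ++ ['.']]
  else ps

-- second pass of B: append the piece and update the running last-line length
-- from the piece's own rfind('\n')
def pvWrapStep (last width : Int) (st : List (List Char) × Int) (p : Int × List Char) : List (List Char) × Int :=
  let parts := st.1 ++ [p.2]
  let j := PySem.Chars.rfind p.2 ['\n']
  let cur := if 0 ≤ j then (p.2.length : Int) - 1 - j else st.2 + (p.2.length : Int)
  if p.1 != last && decide (cur > width) then (parts ++ [['\n', '>', ' ', ' ', ' ']], 4)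
  else (parts, cur)

def FormatOnLines_alt (my_list : List String) (lastword : String) (width : Int) (indent : Int) : String :=
  let pad : List Char := List.replicate indent.toNat ' '
  if ((my_list.length : Int)) == 1 then
    String.ofList ('>' :: pad ++ ((PySem.List.pyGet? my_list 0).getD "").toList ++ ['.'])
  else
    let pieces := pvPieces my_list lastword
    let last : Int := (pieces.length : Int) - 1
    String.ofList (PySem.Chars.join []
      (((PySem.List.enumerate pieces 0).foldl (pvWrapStep last width)
        ([('>' :: pad)], 1 + (pad.length : Int)))).1)

-- ===== PRECONDITION & SPEC =====
def Spec_FormatOnLines (my_list : List String) (lastword : String) (width : Int) (indent : Int) (out : String) : Prop := out = FormatOnLines_alt my_list lastword width indent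
instance (my_list : List String) (lastword : String) (width : Int) (indent : Int) (out : String) : Decidable (Spec_FormatOnLines my_list lastword width indent out) := by unfold Spec_FormatOnLines; infer_instance

-- ===== CLAIM (what is proved, stated in full; the proofs are below) =====
def Claim_equal_FormatOnLines : Prop := ∀ (my_list : List String) (lastword : String) (width : Int) (indent : Int), Dom_FormatOnLines my_list lastword width indent → Spec_FormatOnLines my_list lastword width indent (FormatOnLines my_list lastword width indent)

-- ===== LEMMAS AND PROOFS =====

-- the incremental last-line-length update, the common yardstick of both sides
def pvStep (c : Int) (ch : Char) : Int := if ch == '\n' then 0 else c + 1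

-- the piece A's loop body appends for the entry at index p.1
def pvPieceOf (n : Int) (lw : String) (p : Int × String) : List Char :=
  if p.1 == n - 2 then p.2.toList ++ [' ']
  else if p.1 == n - 1 then lw.toList ++ [' '] ++ p.2.toList ++ ['.']
  else p.2.toList ++ [',', ' ']

-- ---- A-side: the re-split last-line length is the pvStep fold over the line ----

-- structural model of splitting on '\n'
def pvSegs : List Char → List Char → List (List Char)
  | pre, [] => [pre]
  | pre, c :: rest => if c == '\n' then pre :: pvSegs [] rest else pvSegs (pre ++ [c]) rest

set_option maxRecDepth 4096 in
theorem pvSegs_go_eq (l : List Char) : ∀ (fuel : Nat) (cur : List Char) (acc : List (List Char)),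
    l.length ≤ fuel →
    PySem.Chars.splitOn.go ['\n'] fuel l cur acc = acc.reverse ++ pvSegs cur.reverse l := by
  induction l with
  | nil =>
    intro fuel cur acc _
    cases fuel <;> simp [PySem.Chars.splitOn.go, pvSegs]
  | cons c rest ih =>
    intro fuel cur acc h
    cases fuel with
    | zero => simp at h
    | succ f =>
      rw [PySem.Chars.splitOn.go.eq_def]
      simp only [List.isPrefixOf, Bool.and_true, List.length_cons, List.length_nil,
        List.drop_succ_cons, List.drop_zero]
      by_cases hc : c = '\n'
      · subst hc
        rw [if_pos (by simp)]
        rw [ih f [] (cur.reverse :: acc) (by simp at h; omega)]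
        rw [show pvSegs cur.reverse ('\n' :: rest) = cur.reverse :: pvSegs [] rest from by
          rw [pvSegs]; simp]
        simp
      · rw [if_neg (by simp only [beq_iff_eq]; exact fun e => hc e.symm)]
        rw [ih f (c :: cur) acc (by simp at h; omega)]
        simp [pvSegs, hc]

theorem pvSplitOn_eq (cs : List Char) : PySem.Chars.splitOn cs ['\n'] = pvSegs [] cs := by
  unfold PySem.Chars.splitOn
  rw [pvSegs_go_eq cs (cs.length + 1) [] [] (by omega)]
  simp

theorem pvSegs_ne_nil : ∀ (l pre : List Char), pvSegs pre l ≠ [] := by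
  intro l
  induction l with
  | nil => intro pre; simp [pvSegs]
  | cons c rest ih =>
    intro pre
    by_cases hc : c = '\n' <;> simp [pvSegs, hc, ih]

theorem pvGetLastD_of_ne_nil {α : Type} (xs : List α) (a b : α) (h : xs ≠ []) :
    xs.getLastD a = xs.getLastD b := by
  cases xs with
  | nil => exact absurd rfl h
  | cons x t => simp only [List.getLastD_cons]

theorem pvSegs_last_len : ∀ (l pre : List Char),
    (((pvSegs pre l).getLastD []).length : Int) = l.foldl pvStep (pre.length : Int) := by
  intro l
  induction l with
  | nil => intro pre; simp [pvSegs]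
  | cons c rest ih =>
    intro pre
    by_cases hc : c = '\n'
    · subst hc
      have hne := pvSegs_ne_nil rest []
      simp only [pvSegs, beq_self_eq_true, if_pos, List.getLastD_cons, List.foldl_cons]
      rw [pvGetLastD_of_ne_nil _ pre [] hne, ih []]
      simp [pvStep]
    · simp only [pvSegs, beq_iff_eq, hc, if_false, List.foldl_cons]
      rw [ih (pre ++ [c])]
      have : pvStep (pre.length : Int) c = ((pre ++ [c]).length : Int) := by
        simp [pvStep, hc]
      rw [this]

-- A's re-split last-line length equals the incremental fold over the line
theorem pvLastLen_eq (cs : List Char) :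
    ((((PySem.List.pyGet? (PySem.Chars.splitOn cs ['\n']) (-1)).getD []).length : Int))
      = cs.foldl pvStep 0 := by
  rw [pvSplitOn_eq]
  have hne := pvSegs_ne_nil cs []
  have hl : 0 < (pvSegs [] cs).length := List.length_pos_iff.mpr hne
  have hget : (PySem.List.pyGet? (pvSegs [] cs) (-1)).getD [] = (pvSegs [] cs).getLastD [] := by
    simp [PySem.List.pyGet?, PySem.List.pyIdx?, hl,
      show -((pvSegs [] cs).length : Int) ≤ -1 by omega,
      List.getLastD_eq_getLast?, List.getLast?_eq_getElem?]
  rw [hget]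
  simpa using pvSegs_last_len cs []

-- A's step, normalised: append the piece, then test the pvStep fold of the new line
theorem pvStepA_eq (n width : Int) (lw : String) (line : List Char) (p : Int × String) :
    pvStepA n width lw line p =
      if p.1 != n - 1 && decide ((line ++ pvPieceOf n lw p).foldl pvStep 0 > width)
        then (line ++ pvPieceOf n lw p) ++ ['\n', '>', ' ', ' ', ' ']
        else line ++ pvPieceOf n lw p := by
  unfold pvStepA pvPieceOf
  by_cases h2 : (p.1 == n - 2) = true <;> by_cases h1 : (p.1 == n - 1) = true <;>
    simp only [h2, h1, if_true, if_false, Bool.false_eq_true, pvLastLen_eq, List.append_assoc]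

-- ---- B-side: rfind('\n') on the piece gives the same pvStep fold ----

theorem pvPrefix_append_singleton (l : List Char) (c x : Char) (h : l ≠ []) :
    [x].isPrefixOf (l ++ [c]) = [x].isPrefixOf l := by
  cases l with
  | nil => exact absurd rfl h
  | cons y t => simp [List.isPrefixOf]

theorem pvGo_snoc (cs : List Char) (c : Char) (hc : ¬ c = '\n') :
    ∀ j, j ≤ cs.length →
      PySem.Chars.rfind.go (cs ++ [c]) ['\n'] j = PySem.Chars.rfind.go cs ['\n'] j := by
  intro j
  induction j with
  | zero =>
    intro _
    rw [PySem.Chars.rfind.go.eq_def, PySem.Chars.rfind.go.eq_def]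
    cases cs with
    | nil =>
      simp only [List.nil_append, List.isPrefixOf, Bool.and_true]
      rw [if_neg (by simp; exact fun e => hc e.symm), if_neg (by simp)]
    | cons y t => simp [List.isPrefixOf]
  | succ j ih =>
    intro hj
    rw [PySem.Chars.rfind.go.eq_def, PySem.Chars.rfind.go.eq_def]
    simp only []
    rcases Nat.lt_or_ge (j + 1) cs.length with hlt | hge
    · have hdrop : (cs ++ [c]).drop (j + 1) = cs.drop (j + 1) ++ [c] :=
        List.drop_append_of_le_length (by omega)
      have hne : cs.drop (j + 1) ≠ [] := by
        intro h
        have := List.length_drop (l := cs) (i := j + 1)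
        rw [h] at this
        simp at this
        omega
      rw [hdrop, pvPrefix_append_singleton _ _ _ hne]
      by_cases hp : (['\n'].isPrefixOf (cs.drop (j + 1))) = true
      · rw [if_pos hp, if_pos hp]
      · rw [if_neg hp, if_neg hp]
        exact ih (by omega)
    · have hj1 : j + 1 = cs.length := by omega
      have hd1 : (cs ++ [c]).drop (j + 1) = [c] := by
        rw [List.drop_append_of_le_length (by omega), hj1, List.drop_length]
        simp
      have hd2 : cs.drop (j + 1) = [] := by rw [hj1, List.drop_length]
      rw [hd1, hd2]
      rw [if_neg (by simp [List.isPrefixOf]; exact fun e => hc e.symm),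
        if_neg (by simp [List.isPrefixOf])]
      exact ih (by omega)

theorem pvRfind_snoc (cs : List Char) (c : Char) :
    PySem.Chars.rfind (cs ++ [c]) ['\n']
      = if c = '\n' then (cs.length : Int) else PySem.Chars.rfind cs ['\n'] := by
  unfold PySem.Chars.rfind
  rw [show (cs ++ [c]).length = cs.length + 1 by simp]
  rw [PySem.Chars.rfind.go.eq_def]
  simp only []
  rw [if_neg (by
    rw [List.drop_eq_nil_of_le (by simp)]
    simp [List.isPrefixOf])]
  by_cases hc : c = '\n'
  · subst hc
    rw [if_pos rfl]
    cases cs with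
    | nil =>
      rw [PySem.Chars.rfind.go.eq_def]
      simp [List.isPrefixOf]
    | cons y t =>
      rw [PySem.Chars.rfind.go.eq_def]
      simp only [List.length_cons]
      rw [if_pos (by
        rw [show ((y :: t) ++ ['\n']).drop (t.length + 1)
            = (y :: t).drop (t.length + 1) ++ ['\n'] from
          List.drop_append_of_le_length (by simp)]
        rw [show (y :: t).drop (t.length + 1) = [] from by
          rw [show t.length + 1 = (y :: t).length by simp, List.drop_length]]
        simp [List.isPrefixOf])]
  · rw [if_neg hc]
    cases cs with
    | nil =>
      simp only [List.nil_append, List.length_nil]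
      rw [PySem.Chars.rfind.go.eq_def, PySem.Chars.rfind.go.eq_def]
      simp only []
      rw [if_neg (by simp [List.isPrefixOf]; exact fun e => hc e.symm),
        if_neg (by simp [List.isPrefixOf])]
    | cons y t =>
      have := pvGo_snoc (y :: t) c hc (y :: t).length (le_refl _)
      simpa using this

theorem pvRfindFold : ∀ (cs : List Char) (cur : Int),
    (if 0 ≤ PySem.Chars.rfind cs ['\n']
      then (cs.length : Int) - 1 - PySem.Chars.rfind cs ['\n']
      else cur + (cs.length : Int))
      = cs.foldl pvStep cur := by
  intro cs
  induction cs using List.reverseRecOn with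
  | nil => intro cur; rw [if_neg (by decide)]; simp
  | append_singleton cs c ih =>
    intro cur
    rw [pvRfind_snoc, List.foldl_append]
    by_cases hc : c = '\n'
    · subst hc
      rw [if_pos rfl, if_pos (by simp)]
      simp [pvStep]
    · rw [if_neg hc]
      rw [show List.foldl pvStep (List.foldl pvStep cur cs) [c]
          = List.foldl pvStep cur cs + 1 from by simp [pvStep, hc]]
      rw [← ih cur]
      by_cases h0 : 0 ≤ PySem.Chars.rfind cs ['\n']
      · rw [if_pos h0, if_pos h0]
        simp
        omega
      · rw [if_neg h0, if_neg h0]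
        simp
        omega

-- ---- pieces pass: pvPieces is the per-index piece of every entry ----

theorem pvEnumMap {α β : Type} (F : Int × α → β) : ∀ (l : List α) (s : Int),
    PySem.List.enumerate ((PySem.List.enumerate l s).map F) s
      = (PySem.List.enumerate l s).map (fun p => (p.1, F p)) := by
  intro l
  induction l with
  | nil => intro s; simp [PySem.List.enumerate_nil]
  | cons x t ih =>
    intro s
    simp only [PySem.List.enumerate_cons, List.map_cons]
    exact congrArg _ (ih (s + 1))

theorem pvL1 (lw : String) : ∀ (t : List String) (a b : String) (s n : Int),
    n = s + (t.length : Int) + 2 →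
    (PySem.List.enumerate (t ++ [a, b]) s).map (pvPieceOf n lw)
      = t.map (fun e => e.toList ++ [',', ' '])
        ++ [a.toList ++ [' '], lw.toList ++ [' '] ++ b.toList ++ ['.']] := by
  intro t
  induction t with
  | nil =>
    intro a b s n hn
    simp only [List.nil_append, PySem.List.enumerate_cons, PySem.List.enumerate_nil,
      List.map_cons, List.map_nil]
    have e1 : pvPieceOf n lw (s, a) = a.toList ++ [' '] := by
      unfold pvPieceOf
      rw [if_pos (by simp at hn ⊢; omega)]
    have e2 : pvPieceOf n lw (s + 1, b) = lw.toList ++ [' '] ++ b.toList ++ ['.'] := by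
      unfold pvPieceOf
      rw [if_neg (by simp at hn ⊢; omega), if_pos (by simp at hn ⊢; omega)]
    rw [e1, e2]
  | cons x t ih =>
    intro a b s n hn
    simp only [List.cons_append, PySem.List.enumerate_cons, List.map_cons]
    have hx : pvPieceOf n lw (s, x) = x.toList ++ [',', ' '] := by
      unfold pvPieceOf
      rw [if_neg (by simp at hn ⊢; omega), if_neg (by simp at hn ⊢; omega)]
    rw [hx, ih a b (s + 1) n (by simp at hn ⊢; omega)]

theorem pvPieces_eq (my_list : List String) (lw : String) (h : my_list.length ≠ 1) :
    pvPieces my_list lw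
      = (PySem.List.enumerate my_list 0).map (pvPieceOf (my_list.length : Int) lw) := by
  unfold pvPieces
  rcases Nat.lt_or_ge my_list.length 2 with hlt | hge
  · have h0 : my_list.length = 0 := by omega
    have : my_list = [] := List.eq_nil_of_length_eq_zero h0
    subst this
    simp [PySem.List.slice, PySem.List.enumerate_nil]
  · rw [if_pos hge]
    have h2 : my_list.length - 2 < my_list.length := by omega
    have h1 : my_list.length - 1 < my_list.length := by omega
    have hdrop : my_list.drop (my_list.length - 2) = [my_list[my_list.length - 2], my_list[my_list.length - 1]] := by
      rw [List.drop_eq_getElem_cons h2]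
      rw [show my_list.length - 2 + 1 = my_list.length - 1 by omega]
      rw [List.drop_eq_getElem_cons h1]
      rw [show my_list.length - 1 + 1 = my_list.length by omega, List.drop_length]
    have hsplit : my_list = my_list.take (my_list.length - 2)
        ++ [my_list[my_list.length - 2], my_list[my_list.length - 1]] := by
      conv_lhs => rw [← List.take_append_drop (my_list.length - 2) my_list]
      rw [hdrop]
    rw [PySem.List.slice_to_neg_ofNat my_list 2 (by omega)]
    rw [PySem.List.pyGet?_neg_ofNat my_list 2 (by omega) (by omega)]
    rw [PySem.List.pyGet?_neg_ofNat my_list 1 (by omega) (by omega)]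
    rw [List.getElem?_eq_getElem h2, List.getElem?_eq_getElem h1]
    simp only [Option.getD_some]
    conv_rhs => rw [hsplit]
    exact (pvL1 lw (my_list.take (my_list.length - 2))
      my_list[my_list.length - 2] my_list[my_list.length - 1] 0 _
      (by simp [List.length_take])).symm

-- ---- main loop invariant ----

theorem pvLoop_inv (n width : Int) (lw : String) :
    ∀ (l : List (Int × String)) (line : List Char) (parts : List (List Char)) (cur : Int),
      parts.flatten = line → cur = line.foldl pvStep 0 →
      ((l.foldl (fun st p => pvWrapStep (n - 1) width st (p.1, pvPieceOf n lw p)) (parts, cur)).1.flatten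
          = l.foldl (pvStepA n width lw) line)
        ∧ (l.foldl (fun st p => pvWrapStep (n - 1) width st (p.1, pvPieceOf n lw p)) (parts, cur)).2
          = (l.foldl (pvStepA n width lw) line).foldl pvStep 0 := by
  intro n_l
  induction n_l with
  | nil => intro line parts cur h1 h2; simpa using ⟨h1, h2⟩
  | cons p rest ih =>
    intro line parts cur h1 h2
    simp only [List.foldl_cons]
    have hB : pvWrapStep (n - 1) width (parts, cur) (p.1, pvPieceOf n lw p)
        = (if p.1 != n - 1 && decide ((line ++ pvPieceOf n lw p).foldl pvStep 0 > width)
            then (parts ++ [pvPieceOf n lw p] ++ [['\n', '>', ' ', ' ', ' ']], 4)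
            else (parts ++ [pvPieceOf n lw p], (line ++ pvPieceOf n lw p).foldl pvStep 0)) := by
      simp only [pvWrapStep]
      rw [pvRfindFold (pvPieceOf n lw p) cur]
      rw [show (pvPieceOf n lw p).foldl pvStep cur = (line ++ pvPieceOf n lw p).foldl pvStep 0 from by
        rw [List.foldl_append, ← h2]]
    rw [hB, pvStepA_eq]
    by_cases hc : (p.1 != n - 1 && decide ((line ++ pvPieceOf n lw p).foldl pvStep 0 > width)) = true
    · rw [if_pos hc, if_pos hc]
      exact ih _ _ _ (by simp [h1]) (by simp [List.foldl_append, pvStep])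
    · rw [if_neg hc, if_neg hc]
      exact ih _ _ _ (by simp [h1]) rfl

theorem pvJoin_nil_eq_flatten (parts : List (List Char)) :
    PySem.Chars.join [] parts = parts.flatten := by
  show List.intercalate [] parts = parts.flatten
  induction parts with
  | nil => simp [List.intercalate]
  | cons x t ih =>
    cases t with
    | nil => simp [List.intercalate]
    | cons y s =>
      simp only [List.intercalate, List.intersperse] at *
      simp only [List.flatten_cons, List.nil_append] at *
      rw [ih]

theorem pvFoldl_replicate_space (m : Nat) : ∀ (k : Int),
    List.foldl pvStep k (List.replicate m ' ') = k + m := by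
  induction m with
  | zero => intro k; simp
  | succ j ih =>
    intro k
    rw [List.replicate_succ, List.foldl_cons, ih]
    simp [pvStep]
    omega

theorem FormatOnLines_eq (my_list : List String) (lastword : String) (width : Int) (indent : Int) :
    FormatOnLines my_list lastword width indent = FormatOnLines_alt my_list lastword width indent := by
  unfold FormatOnLines FormatOnLines_alt
  by_cases h1 : (((my_list.length : Int)) == 1) = true
  · simp only [h1, if_pos]
  · simp only [h1, Bool.false_eq_true, not_false_eq_true, if_neg]
    have hne : my_list.length ≠ 1 := by
      intro h; apply h1; simp [h]
    rw [pvPieces_eq my_list lastword hne]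
    rw [pvEnumMap (pvPieceOf (my_list.length : Int) lastword) my_list 0]
    rw [List.foldl_map]
    have hlast : ((((PySem.List.enumerate my_list 0).map
        (pvPieceOf (my_list.length : Int) lastword)).length : Int) - 1) = (my_list.length : Int) - 1 := by
      rw [List.length_map, PySem.List.length_enumerate]
    rw [hlast]
    have h0 : List.flatten [('>' :: List.replicate indent.toNat ' ')]
        = '>' :: List.replicate indent.toNat ' ' := by simp
    have hc0 : (1 + ((List.replicate indent.toNat ' ').length : Int))
        = ('>' :: List.replicate indent.toNat ' ').foldl pvStep 0 := by
      rw [List.foldl_cons]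
      rw [pvFoldl_replicate_space indent.toNat (pvStep 0 '>')]
      simp [pvStep]
    have := pvLoop_inv (my_list.length : Int) width lastword
      (PySem.List.enumerate my_list 0) ('>' :: List.replicate indent.toNat ' ')
      [('>' :: List.replicate indent.toNat ' ')] (1 + ((List.replicate indent.toNat ' ').length : Int))
      h0 hc0
    rw [pvJoin_nil_eq_flatten, this.1]

-- ===== VERDICT (by name: the statement is the Claim_ definition above) =====
theorem FormatOnLines_spec : Claim_equal_FormatOnLines := by
  intro my_list lastword width indent _
  unfold Spec_FormatOnLines
  exact FormatOnLines_eq my_list lastword width indent
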